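-- pv_equiv track=rewrite | github.com/chenxu2394/layout-gen | gen.py | generate_base_grid
-- ===== SOURCE A (Python) =====
-- def generate_base_grid(width, height):
--     grid = []
--     for row in range(height):
--         line = []
--         if row % 2 == 0:
--             # Even rows: all 'r's
--             line = ['r'] * width
--         else:
--             # Odd rows: 'rQ' pattern
--             for col in range(width):
--                 if col % 2 == 0:
--                     line.append('r')
--                 else:
--                     line.append('Q')
--             # Adjust the line length if width is odd
--             if len(line) < width:
--                 line.append('r')
--         grid.append(line)
--     return grid
-- ===== SOURCE B (Python) =====
-- def generate_base_grid(width, height):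
--     return [['Q' if row % 2 == 1 and col % 2 == 1 else 'r'
--              for col in range(width)]
--             for row in range(height)]
-- ===== Notes on version B (the rewrite author's own statement) =====
-- stated objective: simpler
-- what changed: Replaces A's row-parity branch (bulk even-row fill, odd-row append loop, dead length fix-up) with one nested comprehension applying a single per-cell parity predicate.
import Mathlib
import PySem

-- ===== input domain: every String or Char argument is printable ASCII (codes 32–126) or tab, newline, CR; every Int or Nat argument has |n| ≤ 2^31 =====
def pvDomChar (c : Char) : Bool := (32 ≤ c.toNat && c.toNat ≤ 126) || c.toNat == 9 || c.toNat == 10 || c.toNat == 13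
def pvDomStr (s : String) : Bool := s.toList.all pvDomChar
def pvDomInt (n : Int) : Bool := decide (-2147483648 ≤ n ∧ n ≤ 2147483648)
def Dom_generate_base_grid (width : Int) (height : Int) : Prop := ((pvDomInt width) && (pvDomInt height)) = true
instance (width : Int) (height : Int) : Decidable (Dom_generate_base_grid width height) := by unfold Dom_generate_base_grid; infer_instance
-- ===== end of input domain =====

-- B replaces A's row-parity branching with one nested comprehension using a single per-cell parity predicate (simpler; same cost).

-- ===== PORT A =====
def generate_base_grid (width : Int) (height : Int) : List (List String) :=
  (PySem.List.pyRange 0 height 1).foldl (fun grid row =>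
    let line : List String :=
      if PySem.Int.mod row 2 == 0 then
        -- ['r'] * width
        List.replicate width.toNat "r"
      else
        let line := (PySem.List.pyRange 0 width 1).foldl (fun line col =>
          if PySem.Int.mod col 2 == 0 then line ++ ["r"] else line ++ ["Q"]) []
        if (line.length : Int) < width then line ++ ["r"] else line
    grid ++ [line]) []

-- ===== PORT B =====
def generate_base_grid_alt (width : Int) (height : Int) : List (List String) :=
  (PySem.List.pyRange 0 height 1).map (fun row =>
    (PySem.List.pyRange 0 width 1).map (fun col =>
      if PySem.Int.mod row 2 == 1 && PySem.Int.mod col 2 == 1 then "Q" else "r"))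

-- ===== PRECONDITION & SPEC =====
def Spec_generate_base_grid (width : Int) (height : Int) (out : List (List String)) : Prop := out = generate_base_grid_alt width height
instance (width : Int) (height : Int) (out : List (List String)) : Decidable (Spec_generate_base_grid width height out) := by unfold Spec_generate_base_grid; infer_instance

-- ===== CLAIM (what is proved, stated in full; the proofs are below) =====
def Claim_equal_generate_base_grid : Prop := ∀ (width : Int) (height : Int), Dom_generate_base_grid width height → Spec_generate_base_grid width height (generate_base_grid width height)

-- ===== LEMMAS AND PROOFS =====

-- A's append-with-branch step is the append of a branched element.
theorem step_eq : (fun (line : List String) (col : Int) =>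
      if PySem.Int.mod col 2 == 0 then line ++ ["r"] else line ++ ["Q"])
    = fun line col => line ++ [if PySem.Int.mod col 2 == 0 then "r" else "Q"] := by
  funext line col
  split <;> rfl

-- A's even row (['r'] * width) equals B's row when row % 2 = 0.
theorem row_even (width : Int) (row : Int) (hrow : row % 2 = 0) :
    List.replicate width.toNat "r"
      = (PySem.List.pyRange 0 width 1).map (fun col =>
          if PySem.Int.mod row 2 == 1 && PySem.Int.mod col 2 == 1 then "Q" else "r") := by
  have : ∀ c : Int, (if PySem.Int.mod row 2 == 1 && PySem.Int.mod c 2 == 1 then "Q" else "r") = "r" := by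
    intro c; simp [hrow]
  simp only [this]
  rw [List.map_const', PySem.List.length_pyRange_one]
  norm_num

-- A's odd-row loop (plus its dead length fix-up) equals B's row when row % 2 = 1.
theorem row_odd (width : Int) (row : Int) (hrow : row % 2 = 1) :
    (let line := (PySem.List.pyRange 0 width 1).foldl (fun line col =>
        if PySem.Int.mod col 2 == 0 then line ++ ["r"] else line ++ ["Q"]) ([] : List String)
     if (line.length : Int) < width then line ++ ["r"] else line)
      = (PySem.List.pyRange 0 width 1).map (fun col =>
          if PySem.Int.mod row 2 == 1 && PySem.Int.mod col 2 == 1 then "Q" else "r") := by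
  rw [step_eq, PySem.List.foldl_append_singleton_eq_map]
  simp only [List.nil_append]
  rw [if_neg (by simp only [List.length_map, PySem.List.length_pyRange_one]; omega)]
  apply List.map_congr_left
  intro c hc
  have hc0 : 0 ≤ c := (PySem.List.mem_pyRange_one.mp hc).1
  by_cases h : c % 2 = 0
  · simp [h, hrow]
  · have h1 : c % 2 = 1 := by omega
    simp [h1, hrow]

theorem generate_base_grid_eq (width : Int) (height : Int) :
    generate_base_grid width height = generate_base_grid_alt width height := by
  unfold generate_base_grid generate_base_grid_alt
  rw [PySem.List.foldl_append_singleton_eq_map]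
  simp only [List.nil_append]
  apply List.map_congr_left
  intro row hrow
  by_cases h : row % 2 = 0
  · rw [if_pos (by simp [h])]
    exact row_even width row h
  · have hr0 : 0 ≤ row := (PySem.List.mem_pyRange_one.mp hrow).1
    have h1 : row % 2 = 1 := by omega
    rw [if_neg (by simp [h1])]
    exact row_odd width row h1

-- ===== VERDICT (by name: the statement is the Claim_ definition above) =====
theorem generate_base_grid_spec : Claim_equal_generate_base_grid := by
  intro width height _
  unfold Spec_generate_base_grid
  exact generate_base_grid_eq width height
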